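-- pv_equiv track=rewrite | github.com/fuglede/adventofcode | 2015/day11/solutions.py | has_double_pair
-- ===== SOURCE A (Python) =====
-- def has_double_pair(s):
--     in_pair = True
--     pairs = 0
--     for i in range(1, len(s)):
--         if s[i-1] == s[i]:
--             if in_pair:
--                 pairs += 1
--                 if pairs == 2:
--                     return True
--                 in_pair = False
--             else:
--                 in_pair = True
--         else:
--             in_pair = True
--     return False
-- ===== SOURCE B (Python) =====
-- import re
--
-- def has_double_pair(s):
--     return len(re.findall(r'(.)\1', s, re.DOTALL)) >= 2
-- ===== Notes on version B (the rewrite author's own statement) =====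
-- stated objective: idiomatic
-- what changed: Replaces the manual in_pair state machine with a regex findall counting leftmost non-overlapping repeated-character pairs (re.DOTALL so newlines behave like A).
import Mathlib
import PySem

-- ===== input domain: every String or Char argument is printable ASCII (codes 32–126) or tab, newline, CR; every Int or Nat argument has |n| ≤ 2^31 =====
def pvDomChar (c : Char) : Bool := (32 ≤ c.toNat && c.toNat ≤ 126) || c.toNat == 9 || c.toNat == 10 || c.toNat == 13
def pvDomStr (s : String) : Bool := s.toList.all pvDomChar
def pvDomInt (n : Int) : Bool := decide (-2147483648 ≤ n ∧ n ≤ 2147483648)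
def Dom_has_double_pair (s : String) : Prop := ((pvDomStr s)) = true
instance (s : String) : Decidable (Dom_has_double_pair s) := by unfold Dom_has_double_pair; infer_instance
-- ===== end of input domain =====

-- B replaces A's manual in_pair state machine with a regex findall count of
-- non-overlapping repeated-character pairs (idiomatic; same cost, no speed claim).


-- ===== PORT A =====
-- A's loop over i in range(1, len(s)) comparing s[i-1] with s[i], carried as
-- (prev, remaining chars, in_pair, pairs) with the early return at pairs == 2.
def hdpLoop (prev : Char) : List Char → Bool → Int → Bool
  | c :: rest, in_pair, pairs =>
    if prev == c then
      if in_pair then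
        if pairs + 1 == 2 then true
        else hdpLoop c rest false (pairs + 1)
      else hdpLoop c rest true pairs
    else hdpLoop c rest true pairs
  | [], _, _ => false

def has_double_pair (s : String) : Bool :=
  match s.toList with
  | [] => false
  | c :: rest => hdpLoop c rest true 0

-- ===== PORT B =====
-- port of re.findall(r'(.)\1', s, re.DOTALL): the greedy leftmost scan that
-- consumes two characters on a match, counting the matches.
def countDoubles : List Char → Int
  | a :: b :: rest => if a == b then countDoubles rest + 1 else countDoubles (b :: rest)
  | _ => 0

def has_double_pair_alt (s : String) : Bool :=
  decide (2 ≤ countDoubles s.toList)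

-- ===== PRECONDITION & SPEC =====
def Spec_has_double_pair (s : String) (out : Bool) : Prop := out = has_double_pair_alt s
instance (s : String) (out : Bool) : Decidable (Spec_has_double_pair s out) := by unfold Spec_has_double_pair; infer_instance

-- ===== CLAIM (what is proved, stated in full; the proofs are below) =====
def Claim_equal_has_double_pair : Prop := ∀ (s : String), Dom_has_double_pair s → Spec_has_double_pair s (has_double_pair s)

-- ===== LEMMAS AND PROOFS =====

theorem countDoubles_nonneg : ∀ (l : List Char), 0 ≤ countDoubles l
  | [] => le_refl 0
  | [_] => le_refl 0
  | a :: b :: rest => by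
    simp only [countDoubles]
    split
    · have := countDoubles_nonneg rest
      omega
    · exact countDoubles_nonneg (b :: rest)

-- the loop invariant: with in_pair = true the pair starting at prev is still
-- available to count; with in_pair = false both characters of the last counted
-- pair are already consumed.
theorem hdpLoop_eq : ∀ (rest : List Char) (prev : Char) (p : Int), 0 ≤ p → p ≤ 1 →
    (hdpLoop prev rest true p = decide (2 ≤ p + countDoubles (prev :: rest)) ∧
     hdpLoop prev rest false p = decide (2 ≤ p + countDoubles rest))
  | [], prev, p, h0, h1 => by
    simp only [hdpLoop, countDoubles]
    constructor <;> (symm; simp; omega)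
  | c :: rest, prev, p, h0, h1 => by
    constructor
    · simp only [hdpLoop, countDoubles]
      by_cases hpc : prev == c
      · simp only [hpc, if_true]
        by_cases hp2 : p + 1 = 2
        · have hn := countDoubles_nonneg rest
          have hp : p = 1 := by omega
          simp [hp]
          omega
        · have := (hdpLoop_eq rest c (p + 1) (by omega) (by omega)).2
          simp only [show (p + 1 == 2) = false by simpa using hp2, Bool.false_eq_true,
            if_false, this, decide_eq_decide]
          omega
      · have := (hdpLoop_eq rest c p h0 h1).1
        simp only [hpc, Bool.false_eq_true, if_false, this]
    · simp only [hdpLoop]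
      by_cases hpc : prev == c
      · simpa [hpc] using (hdpLoop_eq rest c p h0 h1).1
      · simpa [hpc] using (hdpLoop_eq rest c p h0 h1).1

-- ===== VERDICT (by name: the statement is the Claim_ definition above) =====
theorem has_double_pair_spec : Claim_equal_has_double_pair := by
  intro s _
  unfold Spec_has_double_pair has_double_pair has_double_pair_alt
  cases h : s.toList with
  | nil => simp [countDoubles]
  | cons c rest =>
    have := (hdpLoop_eq rest c 0 (le_refl 0) (by omega)).1
    simpa using this
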